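-- pv_equiv track=rewrite | github.com/shayahal/vibe-code-bench | src/vibe_code_bench/red_team_agent/report_analyzer.py | _classify_form_type
-- ===== SOURCE A (Python) =====
-- from typing import Dict, List, Any, Optional
--
-- def _classify_form_type(
--     form: Dict[str, Any], page_url: str, page_type: Optional[str]
-- ) -> str:
--     """
--     Classify form type based on form fields and page context.
--
--     Args:
--         form: Form dictionary
--         page_url: URL of the page containing the form
--         page_type: Type of the page
--
--     Returns:
--         Form type classification
--     """
--     url_lower = page_url.lower()
--     page_type_lower = (page_type or "").lower()
--     fields = form.get("fields", [])
--     field_names = [f.get("name", "").lower() for f in fields]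
--     field_types = [f.get("type", "").lower() for f in fields]
--
--     # Check for login forms
--     if (
--         "login" in url_lower
--         or "signin" in url_lower
--         or page_type_lower == "login"
--         or ("username" in field_names or "email" in field_names)
--         and "password" in field_types
--     ):
--         return "login"
--
--     # Check for registration forms
--     if (
--         "register" in url_lower
--         or "signup" in url_lower
--         or "sign-up" in url_lower
--         or page_type_lower == "registration"
--     ):
--         return "registration"
--
--     # Check for search forms
--     if (
--         "search" in url_lower
--         or "q=" in url_lower
--         or "query" in field_names
--         or page_type_lower == "search"
--     ):
--         return "search"
--
--     # Check for contact forms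
--     if (
--         "contact" in url_lower
--         or "message" in field_names
--         or "comment" in field_names
--         or page_type_lower == "contact"
--     ):
--         return "contact"
--
--     # Check for checkout/payment forms
--     if (
--         "checkout" in url_lower
--         or "payment" in url_lower
--         or "card" in field_names
--         or page_type_lower in ["checkout", "payment"]
--     ):
--         return "checkout"
--
--     # Default
--     return "generic"
-- ===== SOURCE B (Python) =====
-- def _classify_form_type(form, page_url, page_type):
--     # Priority-minimisation over a flat table of atomic triggers: every keyword /
--     # page-type / field-name cue carries the priority of its class (0 = login ...
--     # 4 = checkout); the answer is the class of the best (smallest) priority that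
--     # fires, 'generic' if none does.  Loop order is irrelevant to the result.
--     LABELS = ["login", "registration", "search", "contact", "checkout", "generic"]
--     url = page_url.lower()
--     pt = (page_type or "").lower()
--     fields = form.get("fields", [])
--     names = [f.get("name", "").lower() for f in fields]
--     types = [f.get("type", "").lower() for f in fields]
--     triggers = [
--         (0, "login" in url), (0, "signin" in url), (0, pt == "login"),
--         (0, ("username" in names or "email" in names) and "password" in types),
--         (1, "register" in url), (1, "signup" in url), (1, "sign-up" in url),
--         (1, pt == "registration"),
--         (2, "search" in url), (2, "q=" in url), (2, "query" in names),
--         (2, pt == "search"),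
--         (3, "contact" in url), (3, "message" in names), (3, "comment" in names),
--         (3, pt == "contact"),
--         (4, "checkout" in url), (4, "payment" in url), (4, "card" in names),
--         (4, pt == "checkout"), (4, pt == "payment"),
--     ]
--     best = 5
--     for p, hit in triggers:
--         if hit and p < best:
--             best = p
--     return LABELS[best]
-- ===== Notes on version B (the rewrite author's own statement) =====
-- stated objective: alternative
-- what changed: Replaces the first-match cascade of five composite guard conditions by priority minimisation over a flat table of 21 atomic triggers (keyword/page-type/field cues each tagged with their class's priority): one loop keeps the smallest priority that fires and the label is read off by index, so the result no longer depends on evaluation order.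
import Mathlib
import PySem

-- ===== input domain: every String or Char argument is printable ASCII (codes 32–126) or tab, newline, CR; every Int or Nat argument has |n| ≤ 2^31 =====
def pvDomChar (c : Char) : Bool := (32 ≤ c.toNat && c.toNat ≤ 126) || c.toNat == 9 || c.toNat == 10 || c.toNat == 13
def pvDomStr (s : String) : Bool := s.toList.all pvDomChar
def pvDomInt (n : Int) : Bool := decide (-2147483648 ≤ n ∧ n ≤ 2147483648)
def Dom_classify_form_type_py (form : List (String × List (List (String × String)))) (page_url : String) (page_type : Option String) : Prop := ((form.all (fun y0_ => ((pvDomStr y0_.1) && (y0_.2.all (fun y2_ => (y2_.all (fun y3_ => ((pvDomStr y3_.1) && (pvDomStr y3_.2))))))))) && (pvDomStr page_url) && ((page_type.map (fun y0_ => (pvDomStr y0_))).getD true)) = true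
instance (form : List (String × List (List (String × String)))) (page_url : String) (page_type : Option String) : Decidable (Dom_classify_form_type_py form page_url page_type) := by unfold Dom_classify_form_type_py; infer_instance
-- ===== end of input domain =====

-- B replaces A's first-match cascade of five composite guards by priority minimisation over a
-- flat table of atomic triggers (each cue tagged with its class's priority); same cost, order-independent.


-- ===== PORT A =====
def classify_form_type_py (form : List (String × List (List (String × String)))) (page_url : String) (page_type : Option String) : String :=
  let url_lower := PySem.Str.lower page_url
  let page_type_lower := PySem.Str.lower (page_type.getD "")
  let fields := (PySem.Dict.mk form).getD "fields" []
  let field_names := fields.map (fun f => PySem.Str.lower ((PySem.Dict.mk f).getD "name" ""))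
  let field_types := fields.map (fun f => PySem.Str.lower ((PySem.Dict.mk f).getD "type" ""))
  -- check for login forms ('and' binds tighter than 'or', as in Python)
  if PySem.Str.isIn "login" url_lower || PySem.Str.isIn "signin" url_lower
      || page_type_lower == "login"
      || ((field_names.contains "username" || field_names.contains "email")
          && field_types.contains "password") then "login"
  -- check for registration forms
  else if PySem.Str.isIn "register" url_lower || PySem.Str.isIn "signup" url_lower
      || PySem.Str.isIn "sign-up" url_lower || page_type_lower == "registration" then "registration"
  -- check for search forms
  else if PySem.Str.isIn "search" url_lower || PySem.Str.isIn "q=" url_lower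
      || field_names.contains "query" || page_type_lower == "search" then "search"
  -- check for contact forms
  else if PySem.Str.isIn "contact" url_lower || field_names.contains "message"
      || field_names.contains "comment" || page_type_lower == "contact" then "contact"
  -- check for checkout/payment forms
  else if PySem.Str.isIn "checkout" url_lower || PySem.Str.isIn "payment" url_lower
      || field_names.contains "card" || ["checkout", "payment"].contains page_type_lower then "checkout"
  else "generic"

-- ===== PORT B =====
def classify_form_type_py_alt (form : List (String × List (List (String × String)))) (page_url : String) (page_type : Option String) : String :=
  let LABELS : List String := ["login", "registration", "search", "contact", "checkout", "generic"]
  let url := PySem.Str.lower page_url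
  let pt := PySem.Str.lower (page_type.getD "")
  let fields := (PySem.Dict.mk form).getD "fields" []
  let names := fields.map (fun f => PySem.Str.lower ((PySem.Dict.mk f).getD "name" ""))
  let types := fields.map (fun f => PySem.Str.lower ((PySem.Dict.mk f).getD "type" ""))
  let triggers : List (Nat × Bool) :=
    [ (0, PySem.Str.isIn "login" url), (0, PySem.Str.isIn "signin" url), (0, pt == "login"),
      (0, (names.contains "username" || names.contains "email") && types.contains "password"),
      (1, PySem.Str.isIn "register" url), (1, PySem.Str.isIn "signup" url), (1, PySem.Str.isIn "sign-up" url),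
      (1, pt == "registration"),
      (2, PySem.Str.isIn "search" url), (2, PySem.Str.isIn "q=" url), (2, names.contains "query"),
      (2, pt == "search"),
      (3, PySem.Str.isIn "contact" url), (3, names.contains "message"), (3, names.contains "comment"),
      (3, pt == "contact"),
      (4, PySem.Str.isIn "checkout" url), (4, PySem.Str.isIn "payment" url), (4, names.contains "card"),
      (4, pt == "checkout"), (4, pt == "payment") ]
  let best := triggers.foldl (fun b t => if t.2 && decide (t.1 < b) then t.1 else b) 5
  -- best only ever decreases from 5, so Python's LABELS[best] never raises; the default is unreachable
  LABELS.getD best "generic"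

-- ===== PRECONDITION & SPEC =====
def Spec_classify_form_type_py (form : List (String × List (List (String × String)))) (page_url : String) (page_type : Option String) (out : String) : Prop := out = classify_form_type_py_alt form page_url page_type
instance (form : List (String × List (List (String × String)))) (page_url : String) (page_type : Option String) (out : String) : Decidable (Spec_classify_form_type_py form page_url page_type out) := by unfold Spec_classify_form_type_py; infer_instance

-- ===== CLAIM =====
def Claim_equal_classify_form_type_py : Prop := ∀ (form : List (String × List (List (String × String)))) (page_url : String) (page_type : Option String), Dom_classify_form_type_py form page_url page_type → Spec_classify_form_type_py form page_url page_type (classify_form_type_py form page_url page_type)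

-- ===== LEMMAS AND PROOFS =====
-- one trigger step = 'lower the running minimum if the cue fires'
theorem pv_step_eq (b p : Nat) (c : Bool) :
    (if c && decide (p < b) then p else b) = if c then min b p else b := by
  cases c <;> simp
  split <;> omega

-- two adjacent same-priority steps merge into the disjunction of their cues
theorem pv_merge (b p : Nat) (x y : Bool) :
    (if y then min (if x then min b p else b) p else (if x then min b p else b))
      = if x || y then min b p else b := by
  cases x <;> cases y <;> simp

-- B's merged minimum chain, read back through LABELS, is A's cascade
theorem pv_final (P1 P2 P3 P4 P5 : Bool) :
    (["login", "registration", "search", "contact", "checkout", "generic"] : List String).getD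
      (if P5 then min (if P4 then min (if P3 then min (if P2 then min (if P1 then min 5 0 else 5) 1
          else (if P1 then min 5 0 else 5)) 2
          else (if P2 then min (if P1 then min 5 0 else 5) 1 else (if P1 then min 5 0 else 5))) 3
          else (if P3 then min (if P2 then min (if P1 then min 5 0 else 5) 1
          else (if P1 then min 5 0 else 5)) 2
          else (if P2 then min (if P1 then min 5 0 else 5) 1 else (if P1 then min 5 0 else 5)))) 4
          else (if P4 then min (if P3 then min (if P2 then min (if P1 then min 5 0 else 5) 1
          else (if P1 then min 5 0 else 5)) 2
          else (if P2 then min (if P1 then min 5 0 else 5) 1 else (if P1 then min 5 0 else 5))) 3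
          else (if P3 then min (if P2 then min (if P1 then min 5 0 else 5) 1
          else (if P1 then min 5 0 else 5)) 2
          else (if P2 then min (if P1 then min 5 0 else 5) 1 else (if P1 then min 5 0 else 5)))))
      "generic"
    = (if P1 then "login" else if P2 then "registration" else if P3 then "search"
       else if P4 then "contact" else if P5 then "checkout" else "generic") := by
  cases P1 <;> cases P2 <;> cases P3 <;> cases P4 <;> cases P5 <;> rfl

-- ===== VERDICT =====
set_option maxHeartbeats 2000000 in
theorem classify_form_type_py_spec : Claim_equal_classify_form_type_py := by
  intro form page_url page_type _
  unfold Spec_classify_form_type_py classify_form_type_py classify_form_type_py_alt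
  simp only [List.foldl_cons, List.foldl_nil, pv_step_eq, pv_merge, List.contains_cons,
    List.contains_nil, Bool.or_false, Bool.or_assoc]
  exact (pv_final _ _ _ _ _).symm
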